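-- pv_equiv track=rewrite | github.com/rdbliss/hardin | hardin.py | gen_follows_rect
-- ===== SOURCE A (Python) =====
-- import itertools
--
-- def gen_follows_rect(r, row):
--     """
--     Return all rows which could follow `row` in the rectangular part of a
--     Hardinian array with parameter r and len(row) columns. "Rectangular part"
--     means j >= len(row), so the king distance is constant along every row and
--     increases by 1 for every step down.
--     """
--     k = len(row)
--     new_row = [0] * k
--     row_delta = [row[k + 1] - row[k] for k in range(len(row) - 1)]
--
--     unknown = set(range(k))
--     for j, delta in enumerate(row_delta):
--         if delta == 1:
--             # T = M - KD + r
--             # new_row[j + 1] and row[j] have the same Hardinian value, and king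
--             # distance went up up by 1 from the step down.
--             new_row[j + 1] = row[j + 1] - 1
--             unknown -= {j + 1}
--
--     for delta in itertools.product({0, 1}, repeat=len(unknown)):
--         for j, delt in zip(unknown, delta):
--             new_row[j] = row[j] - delt
--
--         if valid_follow_rect(r, row, new_row):
--             yield tuple(new_row)
--
-- def valid_follow_rect(r, row, new_row):
--     """
--     Check if `new_row` could follow `row` in the rectangular part of a
--     Hardinian array with parameter r.
--     """
--
--     # T = M - max(i, j) + r
--     if row[0] - new_row[0] not in {0, 1}:
--         return False
--
--     if new_row[0] < 0:
--         return False
--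
--     for j in range(len(row) - 1):
--         if new_row[j + 1] - new_row[j] not in {0, 1}:
--             return False
--
--         if row[j + 1] - new_row[j + 1] not in {0, 1}:
--             return False
--
--         if row[j] - new_row[j + 1] not in {0, 1}:
--             return False
--
--     return True
-- ===== SOURCE B (Python) =====
-- def gen_follows_rect(r, row):
--     """
--     Backtracking DFS over the columns: at each position j the candidate new
--     values are row[j]-1 alone (when row[j]-row[j-1] == 1 forces it) or
--     [row[j], row[j]-1]; each extension is checked against the local Hardinian
--     constraints immediately, so invalid branches are pruned instead of being
--     enumerated and rejected wholesale.
--     """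
--     k = len(row)
--
--     def ok(j, prev, cur):
--         if row[j] - cur not in (0, 1):
--             return False
--         if j == 0:
--             return cur >= 0
--         return cur - prev in (0, 1) and row[j - 1] - cur in (0, 1)
--
--     def dfs(j, acc):
--         if j == k:
--             yield tuple(acc)
--             return
--         if j >= 1 and row[j] - row[j - 1] == 1:
--             cand = (row[j] - 1,)
--         else:
--             cand = (row[j], row[j] - 1)
--         prev = acc[-1] if acc else None
--         for v in cand:
--             if ok(j, prev, v):
--                 acc.append(v)
--                 yield from dfs(j + 1, acc)
--                 acc.pop()
--
--     yield from dfs(0, [])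
-- ===== Notes on version B (the rewrite author's own statement) =====
-- stated objective: faster
-- what changed: A materialises every 0/1 delta assignment for the unknown columns via itertools.product and validates each complete candidate row wholesale; B does a backtracking DFS over the columns in the same order, checking the local Hardinian constraints as each column value is chosen, so invalid branches are pruned instead of enumerated.
import Mathlib
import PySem

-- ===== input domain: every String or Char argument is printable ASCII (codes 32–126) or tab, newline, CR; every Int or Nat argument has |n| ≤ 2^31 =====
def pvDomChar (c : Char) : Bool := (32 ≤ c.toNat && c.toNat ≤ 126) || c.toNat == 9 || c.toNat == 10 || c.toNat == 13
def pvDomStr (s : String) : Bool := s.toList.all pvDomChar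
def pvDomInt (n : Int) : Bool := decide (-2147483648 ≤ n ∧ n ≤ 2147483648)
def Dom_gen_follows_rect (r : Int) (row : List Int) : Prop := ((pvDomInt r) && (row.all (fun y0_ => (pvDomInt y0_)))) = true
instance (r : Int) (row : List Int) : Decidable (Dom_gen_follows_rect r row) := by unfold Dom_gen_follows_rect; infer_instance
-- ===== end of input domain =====

-- B changes the algorithm: instead of enumerating every 0/1 delta assignment and validating whole rows (A),
-- it backtracks over the columns checking the local constraints as each value is chosen (pruned DFS, same output order).
-- Porting notes (both ports): all list indices in these algorithms are non-negative Nat values that are in range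
-- whenever `row ≠ []` (Pre_), so indexing is ported as `List.getD _ _ 0` (exact there; row[0] on the empty row is
-- Python's IndexError, excluded by Pre_). A iterates over Python sets of small non-negative ints (`{0,1}` and
-- `set(range(k))` minus removed elements): CPython iterates such sets in ascending numeric order, so they are
-- ported as ascending lists ([0,1]; List.range k with List.erase) — exact for this usage.

-- ===== PORT A =====
-- x in {0, 1}
def pvIn01 (x : Int) : Bool := x == 0 || x == 1

def valid_follow_rect (r : Int) (row new_row : List Int) : Bool :=
  if !pvIn01 (row.getD 0 0 - new_row.getD 0 0) then false
  else if new_row.getD 0 0 < 0 then false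
  else (List.range (row.length - 1)).all fun j =>
    pvIn01 (new_row.getD (j+1) 0 - new_row.getD j 0) &&
    pvIn01 (row.getD (j+1) 0 - new_row.getD (j+1) 0) &&
    pvIn01 (row.getD j 0 - new_row.getD (j+1) 0)

-- itertools.product({0, 1}, repeat = n), first coordinate slowest, 0 before 1
def pvProd01 : Nat → List (List Int)
  | 0 => [[]]
  | n+1 => [(0 : Int), 1].flatMap fun d => (pvProd01 n).map (d :: ·)

def gen_follows_rect (r : Int) (row : List Int) : List (List Int) :=
  let k := row.length
  let new_row : List Int := List.replicate k 0
  let row_delta := (List.range (row.length - 1)).map fun j => row.getD (j+1) 0 - row.getD j 0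
  -- for j, delta in enumerate(row_delta): fix new_row[j+1], shrink `unknown`
  let st := row_delta.zipIdx.foldl
    (fun (st : List Int × List Nat) jd =>
      if jd.1 == 1 then (st.1.set (jd.2+1) (row.getD (jd.2+1) 0 - 1), st.2.erase (jd.2+1))
      else st)
    (new_row, List.range k)
  -- for delta in product({0,1}, repeat=len(unknown)): overwrite the unknown slots, keep valid rows
  let res := (pvProd01 st.2.length).foldl
    (fun (acc : List Int × List (List Int)) delta =>
      let nr := (st.2.zip delta).foldl (fun nr jd => nr.set jd.1 (row.getD jd.1 0 - jd.2)) acc.1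
      if valid_follow_rect r row nr then (nr, acc.2 ++ [nr]) else (nr, acc.2))
    (st.1, [])
  res.2

-- ===== PORT B =====
-- is new_row[j] forced to row[j]-1?  (j >= 1 and row[j] - row[j-1] == 1)
def pvFix (row : List Int) (p : Nat) : Bool := decide (1 ≤ p) && (row.getD p 0 - row.getD (p-1) 0 == 1)

-- local Hardinian constraints for placing `cur` at column j after `prev`
def pvOk (row : List Int) (j : Nat) (prev cur : Int) : Bool :=
  if !pvIn01 (row.getD j 0 - cur) then false
  else if j == 0 then decide (0 ≤ cur)
  else pvIn01 (cur - prev) && pvIn01 (row.getD (j-1) 0 - cur)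

-- candidate values for column j, delta 0 before delta 1
def pvCand (row : List Int) (j : Nat) : List Int :=
  if pvFix row j then [row.getD j 0 - 1] else [row.getD j 0, row.getD j 0 - 1]

-- dfs(j, acc) with n = k - j remaining columns
def pvDfs (row : List Int) (k : Nat) : Nat → List Int → List (List Int)
  | 0, acc => [acc]
  | n+1, acc =>
    let j := k - (n+1)
    (pvCand row j).flatMap fun v =>
      if pvOk row j (acc.getLast?.getD 0) v then pvDfs row k n (acc ++ [v]) else []

def gen_follows_rect_alt (r : Int) (row : List Int) : List (List Int) :=
  pvDfs row row.length row.length []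

-- ===== PRECONDITION & SPEC =====
-- Pre_ excludes only the empty row, on which Python A raises IndexError (row[0] in valid_follow_rect).
def Pre_gen_follows_rect (r : Int) (row : List Int) : Prop := row ≠ []
instance (r : Int) (row : List Int) : Decidable (Pre_gen_follows_rect r row) := by unfold Pre_gen_follows_rect; infer_instance
def pvWitness_gen_follows_rect : Int × List Int := (0, [0])

def Spec_gen_follows_rect (r : Int) (row : List Int) (out : List (List Int)) : Prop := out = gen_follows_rect_alt r row
instance (r : Int) (row : List Int) (out : List (List Int)) : Decidable (Spec_gen_follows_rect r row out) := by unfold Spec_gen_follows_rect; infer_instance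

-- ===== CLAIM (what is proved, stated in full; the proofs are below) =====
def Claim_equal_gen_follows_rect : Prop := ∀ (r : Int) (row : List Int), Dom_gen_follows_rect r row → Pre_gen_follows_rect r row → Spec_gen_follows_rect r row (gen_follows_rect r row)

-- ===== LEMMAS AND PROOFS =====

-- proof-side vocabulary: unknown columns in [j, j+n), the base row after A's fixing loop,
-- the chain of local checks, the suffix enumeration, and the suffix a delta list builds.
def pvUs (row : List Int) (j n : Nat) : List Nat := (List.range' j n).filter fun p => !pvFix row p

def pvB0 (row : List Int) : List Int :=
  (List.range row.length).map fun p => if pvFix row p then row.getD p 0 - 1 else 0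

def pvChain (row : List Int) : Nat → Int → List Int → Bool
  | _, _, [] => true
  | j, prev, v :: t => pvOk row j prev v && pvChain row (j+1) v t

def pvSufs (row : List Int) : Nat → Nat → List (List Int)
  | _, 0 => [[]]
  | j, n+1 => (pvCand row j).flatMap fun v => (pvSufs row (j+1) n).map (v :: ·)

def pvMix (row : List Int) : Nat → Nat → List Int → List Int
  | 0, _, _ => []
  | n+1, j, d =>
    if pvFix row j then (row.getD j 0 - 1) :: pvMix row n (j+1) d
    else (row.getD j 0 - d.headD 0) :: pvMix row n (j+1) d.tail

theorem pvProd01_length {n : Nat} {d : List Int} (h : d ∈ pvProd01 n) : d.length = n := by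
  induction n generalizing d with
  | zero => simp [pvProd01] at h; simp [h]
  | succ n ih =>
    simp only [pvProd01, List.mem_flatMap, List.mem_map] at h
    obtain ⟨x, -, t, ht, rfl⟩ := h
    simp [ih ht]

theorem pvMix_length (row : List Int) : ∀ n j d, (pvMix row n j d).length = n := by
  intro n
  induction n with
  | zero => intro j d; rfl
  | succ n ih => intro j d; by_cases h : pvFix row j <;> simp [pvMix, h, ih]

theorem pvMix_fixed (row : List Int) :
    ∀ n j d i, i < n → pvFix row (j + i) = true →
      (pvMix row n j d).getD i 0 = row.getD (j + i) 0 - 1 := by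
  intro n
  induction n with
  | zero => intro j d i hi; omega
  | succ n ih =>
    intro j d i hi hfix
    match i with
    | 0 =>
      simp only [Nat.add_zero] at hfix
      simp [pvMix, hfix]
    | i + 1 =>
      have h2 : pvFix row ((j+1) + i) = true := by
        have : (j+1) + i = j + (i+1) := by omega
        rw [this]; exact hfix
      by_cases h : pvFix row j <;>
        simpa [pvMix, h, Nat.add_comm, Nat.add_left_comm, Nat.add_assoc] using
          ih (j+1) _ i (by omega) h2

theorem pvUs_succ (row : List Int) (j n : Nat) :
    pvUs row j (n+1) = if pvFix row j then pvUs row (j+1) n else j :: pvUs row (j+1) n := by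
  simp only [pvUs, List.range'_succ, List.filter_cons]
  by_cases h : pvFix row j <;> simp [h]

-- S1: the suffix enumeration is pvMix applied to the delta products
theorem pvSufs_eq_map_mix (row : List Int) :
    ∀ n j, pvSufs row j n = (pvProd01 (pvUs row j n).length).map (pvMix row n j) := by
  intro n
  induction n with
  | zero => intro j; rfl
  | succ n ih =>
    intro j
    have hus := pvUs_succ row j n
    by_cases h : pvFix row j
    · simp only [pvSufs, pvCand, h, if_pos, hus, ih, List.flatMap_cons, List.flatMap_nil,
        List.append_nil, List.map_map]
      refine List.map_congr_left fun d _ => ?_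
      simp [pvMix, h]
    · simp only [pvSufs, pvCand, h, if_neg, hus, ih, Bool.false_eq_true, not_false_iff,
        List.length_cons, pvProd01, List.map_flatMap, List.flatMap_cons, List.flatMap_nil,
        List.append_nil, List.map_map]
      rw [List.map_append, List.map_map, List.map_map]
      refine congrArg₂ (· ++ ·) ?_ ?_ <;> refine List.map_congr_left fun d _ => ?_ <;>
        simp [pvMix, h]

-- W2: A's overwrite fold equals pvMix
theorem pvWrite_eq_mix (row : List Int) :
    ∀ n j (d c : List Int), j + n = row.length → c.length = row.length →
      d.length = (pvUs row j n).length →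
      (∀ p, p < row.length → pvFix row p = true → c.getD p 0 = row.getD p 0 - 1) →
      ((pvUs row j n).zip d).foldl (fun nr jd => nr.set jd.1 (row.getD jd.1 0 - jd.2)) c
        = c.take j ++ pvMix row n j d := by
  intro n
  induction n with
  | zero =>
    intro j d c hjn hc hd hfix
    simp only [pvUs, List.range'_zero, List.filter_nil, List.zip_nil_left, List.foldl_nil,
      pvMix, List.append_nil]
    rw [List.take_of_length_le (by omega)]
  | succ n ih =>
    intro j d c hjn hc hd hfix
    have hjk : j < row.length := by omega
    rw [pvUs_succ] at hd ⊢
    by_cases h : pvFix row j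
    · rw [if_pos h] at hd ⊢
      rw [ih (j+1) d c (by omega) hc hd hfix]
      have hjc : j < c.length := by omega
      have h2 := hfix j hjk h
      rw [List.getD_eq_getElem?_getD, List.getElem?_eq_getElem hjc, Option.getD_some] at h2
      rw [List.take_add_one, List.getElem?_eq_getElem hjc]
      rw [pvMix, if_pos h]
      simp [h2]
    · rw [if_neg h] at hd ⊢
      cases d with
      | nil => simp at hd
      | cons d0 d' =>
        simp only [List.zip_cons_cons, List.foldl_cons]
        rw [ih (j+1) d' (c.set j (row.getD j 0 - d0)) (by omega) (by simp [hc])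
          (by simpa using hd)
          (fun p hp hfp => by
            have hpj : p ≠ j := fun he => by rw [he] at hfp; exact absurd hfp (by simp [h])
            simp only [List.getD, List.getElem?_set]
            rw [if_neg fun he => hpj he.symm]
            simpa [List.getD] using hfix p hp hfp)]
        have h1 : List.take j (c.set j (row.getD j 0 - d0)) = c.take j := by
          rw [List.take_set, List.set_eq_of_length_le (by simp)]
        have h2 : (c.set j (row.getD j 0 - d0)).take (j+1) = c.take j ++ [row.getD j 0 - d0] := by
          rw [List.take_add_one, h1]
          congr 1
          rw [List.getElem?_set_self (by omega)]
          rfl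
        rw [h2, pvMix, if_neg (by simp [h])]
        simp

theorem pvZipSelf {α : Type} (l : List α) : l.zip l = l.map fun x => (x, x) := by
  induction l with
  | nil => rfl
  | cons a l ih => simp [ih]

theorem pvSetMapRange (k i : Nat) (h : Nat → Int) (v : Int) (hik : i < k) :
    ((List.range k).map h).set i v = (List.range k).map fun p => if p = i then v else h p := by
  refine List.ext_getElem (by simp) fun p hp1 hp2 => ?_
  simp only [List.getElem_set, List.getElem_map, List.getElem_range]
  rcases eq_or_ne p i with rfl | hne
  · simp
  · rw [if_neg (fun he => hne he.symm), if_neg hne]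

theorem pvFixSteps (row : List Int) :
    ∀ m, m < row.length →
      (List.range m).foldl
        (fun (st : List Int × List Nat) j =>
          if (row.getD (j+1) 0 - row.getD j 0) == 1 then
            (st.1.set (j+1) (row.getD (j+1) 0 - 1), st.2.erase (j+1))
          else st)
        (List.replicate row.length 0, List.range row.length)
      = ((List.range row.length).map fun p =>
            if pvFix row p && decide (p ≤ m) then row.getD p 0 - 1 else 0,
         (List.range row.length).filter fun p => !(pvFix row p && decide (p ≤ m))) := by
  intro m
  induction m with
  | zero =>
    intro _
    simp only [List.range_zero, List.foldl_nil]
    refine Prod.ext ?_ ?_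
    · show List.replicate row.length 0 = _
      rw [show ((List.range row.length).map fun p =>
            if pvFix row p && decide (p ≤ 0) then row.getD p 0 - 1 else 0)
          = (List.range row.length).map (fun _ => (0 : Int)) from
          List.map_congr_left fun p hp => by
            rcases Nat.eq_zero_or_pos p with rfl | hp1
            · simp [pvFix]
            · simp [show ¬ (p ≤ 0) by omega]]
      rw [List.map_const', List.length_range]
    · show List.range row.length = _
      symm
      refine List.filter_eq_self.mpr fun p hp => ?_
      rcases Nat.eq_zero_or_pos p with rfl | hp1
      · simp [pvFix]
      · simp [show ¬ (p ≤ 0) by omega]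
  | succ m ihm =>
    intro hm
    rw [List.range_succ, List.foldl_append, ihm (by omega)]
    simp only [List.foldl_cons, List.foldl_nil]
    have hfm : ((row.getD (m+1) 0 - row.getD m 0) == 1) = pvFix row (m+1) := by
      simp [pvFix]
    rw [hfm]
    by_cases h : pvFix row (m+1)
    · rw [if_pos h]
      refine Prod.ext ?_ ?_
      · show (_ : List Int).set (m+1) _ = _
        rw [pvSetMapRange _ _ _ _ (by omega)]
        refine List.map_congr_left fun p hp => ?_
        rcases eq_or_ne p (m+1) with rfl | hne
        · simp [h]
        · rw [if_neg hne]
          have hle : decide (p ≤ m) = decide (p ≤ m + 1) :=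
            decide_eq_decide.mpr (by omega)
          rw [hle]
      · show (_ : List Nat).erase (m+1) = _
        rw [(List.nodup_range.filter _).erase_eq_filter, List.filter_filter]
        refine List.filter_congr fun p hp => ?_
        rcases eq_or_ne p (m+1) with rfl | hne
        · simp [h]
        · have hle : decide (p ≤ m) = decide (p ≤ m + 1) :=
            decide_eq_decide.mpr (by omega)
          simp [hne, hle]
    · rw [if_neg h]
      refine Prod.ext ?_ ?_
      · refine List.map_congr_left fun p hp => ?_
        rcases eq_or_ne p (m+1) with rfl | hne
        · simp [h]
        · have hle : decide (p ≤ m) = decide (p ≤ m + 1) :=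
            decide_eq_decide.mpr (by omega)
          rw [hle]
      · refine List.filter_congr fun p hp => ?_
        rcases eq_or_ne p (m+1) with rfl | hne
        · simp [h]
        · have hle : decide (p ≤ m) = decide (p ≤ m + 1) :=
            decide_eq_decide.mpr (by omega)
          rw [hle]

-- L_fixloop: the first loop of A produces pvB0 and the unknown columns
theorem pvFixloop (row : List Int) (hk : 0 < row.length) :
    ((List.range (row.length - 1)).map fun j => row.getD (j+1) 0 - row.getD j 0).zipIdx.foldl
      (fun (st : List Int × List Nat) jd =>
        if jd.1 == 1 then (st.1.set (jd.2+1) (row.getD (jd.2+1) 0 - 1), st.2.erase (jd.2+1))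
        else st)
      (List.replicate row.length 0, List.range row.length)
      = (pvB0 row, pvUs row 0 row.length) := by
  rw [List.zipIdx_eq_zip_range', List.length_map, List.length_range, ← List.range_eq_range',
    List.zip_map_left, pvZipSelf, List.map_map, List.foldl_map]
  simp only [Function.comp_apply, Prod.map_apply, id_eq]
  rw [pvFixSteps row (row.length - 1) (by omega)]
  refine Prod.ext ?_ ?_
  · show _ = pvB0 row
    simp only [pvB0]
    refine List.map_congr_left fun p hp => ?_
    rw [decide_eq_true (show p ≤ row.length - 1 by
      have := List.mem_range.mp hp; omega), Bool.and_true]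
  · show _ = pvUs row 0 row.length
    simp only [pvUs, ← List.range_eq_range']
    refine List.filter_congr fun p hp => ?_
    rw [decide_eq_true (show p ≤ row.length - 1 by
      have := List.mem_range.mp hp; omega), Bool.and_true]

-- P1: A's product fold is a filterMap of pvMix
theorem pvProdFold (r : Int) (row : List Int) :
    ∀ (L : List (List Int)) (c : List Int) (out : List (List Int)),
      c.length = row.length →
      (∀ p, p < row.length → pvFix row p = true → c.getD p 0 = row.getD p 0 - 1) →
      (∀ d ∈ L, d.length = (pvUs row 0 row.length).length) →
      (L.foldl
        (fun (acc : List Int × List (List Int)) delta =>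
          if valid_follow_rect r row
              (((pvUs row 0 row.length).zip delta).foldl
                (fun nr jd => nr.set jd.1 (row.getD jd.1 0 - jd.2)) acc.1) then
            (((pvUs row 0 row.length).zip delta).foldl
                (fun nr jd => nr.set jd.1 (row.getD jd.1 0 - jd.2)) acc.1,
             acc.2 ++ [((pvUs row 0 row.length).zip delta).foldl
                (fun nr jd => nr.set jd.1 (row.getD jd.1 0 - jd.2)) acc.1])
          else
            (((pvUs row 0 row.length).zip delta).foldl
                (fun nr jd => nr.set jd.1 (row.getD jd.1 0 - jd.2)) acc.1,
             acc.2))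
        (c, out)).2
      = out ++ L.filterMap (fun d =>
          if valid_follow_rect r row (pvMix row row.length 0 d) then
            some (pvMix row row.length 0 d) else none) := by
  intro L
  induction L with
  | nil => intro c out _ _ _; simp
  | cons δ L ih =>
    intro c out hc hfix hdl
    simp only [List.foldl_cons, List.filterMap_cons]
    have hw := pvWrite_eq_mix row row.length 0 δ c (by omega) hc (hdl δ (by simp)) hfix
    simp only [List.take_zero, List.nil_append] at hw
    rw [hw]
    have hlen := pvMix_length row row.length 0 δ
    have hfix' : ∀ p, p < row.length → pvFix row p = true →
        (pvMix row row.length 0 δ).getD p 0 = row.getD p 0 - 1 := fun p hp hf => by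
      simpa using pvMix_fixed row row.length 0 δ p hp (by simpa using hf)
    by_cases hv : valid_follow_rect r row (pvMix row row.length 0 δ)
    · rw [if_pos hv, if_pos hv,
        ih _ _ hlen hfix' (fun d hd => hdl d (by simp [hd]))]
      simp
    · rw [if_neg hv, if_neg hv,
        ih _ _ hlen hfix' (fun d hd => hdl d (by simp [hd]))]

-- B2: the DFS is the filtered suffix enumeration
theorem pvDfs_eq (row : List Int) :
    ∀ n acc, n ≤ row.length →
      pvDfs row row.length n acc
        = (pvSufs row (row.length - n) n).filterMap fun t =>
            if pvChain row (row.length - n) (acc.getLast?.getD 0) t then some (acc ++ t) else none := by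
  intro n
  induction n with
  | zero => intro acc h; simp [pvDfs, pvSufs, pvChain]
  | succ n ih =>
    intro acc h
    have hj : row.length - (n+1) + 1 = row.length - n := by omega
    simp only [pvDfs, pvSufs, List.filterMap_flatMap]
    refine List.flatMap_congr fun v _ => ?_
    rw [List.filterMap_map]
    by_cases hok : pvOk row (row.length - (n+1)) (acc.getLast?.getD 0) v
    · rw [if_pos hok, ih _ (by omega), hj]
      refine List.filterMap_congr fun t _ => ?_
      simp only [Function.comp_apply, List.getLast?_concat, Option.getD_some, List.append_assoc,
        List.singleton_append]
      show _ = (if pvChain row (row.length - (n+1)) (acc.getLast?.getD 0) (v :: t) = true then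
          some (acc ++ v :: t) else none)
      show _ = (if (pvOk row (row.length - (n+1)) (acc.getLast?.getD 0) v &&
          pvChain row (row.length - (n+1) + 1) v t) = true then some (acc ++ v :: t) else none)
      rw [hok, Bool.true_and, hj]
    · rw [if_neg hok]
      symm
      refine List.filterMap_eq_nil_iff.mpr fun t _ => ?_
      simp only [Function.comp_apply]
      show (if pvChain row (row.length - (n+1)) (acc.getLast?.getD 0) (v :: t) = true then
          some (acc ++ v :: t) else none) = none
      show (if (pvOk row (row.length - (n+1)) (acc.getLast?.getD 0) v &&
          pvChain row (row.length - (n+1) + 1) v t) = true then some (acc ++ v :: t) else none) = none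
      simp [hok]

-- V1: the chain of checks, indexed
theorem pvChain_index (row : List Int) :
    ∀ (w : List Int) (j : Nat) (prev : Int),
      pvChain row j prev w = (List.range w.length).all fun i =>
        pvOk row (j + i) (if i = 0 then prev else w.getD (i-1) 0) (w.getD i 0) := by
  intro w
  induction w with
  | nil => intro j prev; rfl
  | cons a w ih =>
    intro j prev
    show (pvOk row j prev a && pvChain row (j+1) a w) = _
    rw [ih, List.length_cons, List.range_succ_eq_map, List.all_cons, List.all_map]
    refine congrArg₂ _ (by simp) ?_
    refine List.all_congr rfl fun i => ?_
    cases i with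
    | zero => simp [Function.comp]
    | succ i =>
      simp only [Function.comp, Nat.succ_eq_add_one, List.getD_cons_succ]
      have h1 : j + 1 + (i + 1) = j + (i + 1 + 1) := by omega
      simp [h1]

-- V2: wholesale validation equals the chain of local checks
theorem pvValid_eq_chain (r : Int) (row : List Int) (v : List Int) (hv : v.length = row.length)
    (hk : 0 < row.length) (p0 : Int) :
    valid_follow_rect r row v = pvChain row 0 p0 v := by
  rw [pvChain_index]
  cases v with
  | nil => rw [← hv] at hk; simp at hk
  | cons v0 w =>
    have hm : row.length - 1 = w.length := by
      simp only [List.length_cons] at hv; omega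
    simp only [List.length_cons, List.range_succ_eq_map, List.all_cons, List.all_map]
    by_cases hc0 : pvIn01 (row.getD 0 0 - v0)
    · by_cases hneg : v0 < 0
      · simp [valid_follow_rect, pvOk, List.getD_cons_zero, hc0, hneg, Int.not_le.mpr hneg]
      · have h0 : (0 : Int) ≤ v0 := by omega
        simp only [valid_follow_rect, pvOk, List.getD_cons_zero, hc0, Bool.not_true,
          Bool.false_eq_true, if_false, if_neg hneg, hm, if_pos rfl, Nat.zero_add,
          decide_eq_true h0, Bool.true_and, beq_self_eq_true]
        refine List.all_congr rfl fun i => ?_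
        simp only [Function.comp_apply, Nat.zero_add, Nat.succ_eq_add_one,
          Nat.add_sub_cancel, List.getD_cons_succ]
        have hcons : ∀ m, (v0 :: w).getD m 0 = (if m = 0 then v0 else w.getD (m-1) 0) := by
          intro m; cases m <;> simp
        by_cases hA : pvIn01 (row.getD (i+1) 0 - w.getD i 0) <;>
          cases i <;>
            simp [pvOk, hA, Bool.and_comm, Bool.and_left_comm, Bool.and_assoc]
    · have hc0' : pvIn01 (row[0]?.getD 0 - v0) = false := by
        rw [Bool.eq_false_iff]; intro h; exact hc0 (by simpa [List.getD] using h)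
      simp [valid_follow_rect, pvOk, hc0']

-- ===== VERDICT (by name: the statement is the Claim_ definition above) =====
theorem gen_follows_rect_spec : Claim_equal_gen_follows_rect := by
  intro r row _ hpre
  have hk : 0 < row.length := List.length_pos_iff.mpr hpre
  show gen_follows_rect r row = gen_follows_rect_alt r row
  have hB0len : (pvB0 row).length = row.length := by simp [pvB0]
  have hB0fix : ∀ p, p < row.length → pvFix row p = true →
      (pvB0 row).getD p 0 = row.getD p 0 - 1 := by
    intro p hp hf
    simp [pvB0, List.getD_eq_getElem?_getD, List.getElem?_map, List.getElem?_range, hp, hf]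
  have hA : gen_follows_rect r row
      = (pvProd01 (pvUs row 0 row.length).length).filterMap (fun d =>
          if valid_follow_rect r row (pvMix row row.length 0 d) then
            some (pvMix row row.length 0 d) else none) := by
    simp only [gen_follows_rect]
    rw [pvFixloop row hk]
    rw [pvProdFold r row _ (pvB0 row) [] hB0len hB0fix
      (fun d hd => pvProd01_length hd), List.nil_append]
  have hB : gen_follows_rect_alt r row
      = (pvSufs row 0 row.length).filterMap (fun t =>
          if pvChain row 0 0 t then some t else none) := by
    show pvDfs row row.length row.length [] = _
    rw [pvDfs_eq row row.length [] le_rfl]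
    simp [Nat.sub_self]
  rw [hA, hB, pvSufs_eq_map_mix, List.filterMap_map]
  refine List.filterMap_congr fun d _ => ?_
  simp only [Function.comp_apply]
  rw [pvValid_eq_chain r row _ (pvMix_length row row.length 0 d) hk 0]
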